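-- pv_equiv track=rewrite | github.com/yunea/ca_eau | eau07.py | to_maj
-- ===== SOURCE A (Python) =====
-- def to_maj(letter):
--     l_min = ["a", "b", "c", "d", "e", "f", "g", "h", "i", "j", "k", "l",
--              "m", "n", "o", "p", "q", "r", "s", "t", "u", "v", "w", "x", "y", "z"]
--     l_maj = ["A", "B", "C", "D", "E", "F", "G", "H", "I", "J", "K", "L",
--              "M", "N", "O", "P", "Q", "R", "S", "T", "U", "V", "W", "X", "Y", "Z"]
--     count_index = 0
--     is_maj = False
--     for l in l_min:
--         if l == letter:
--             break
--         else:
--             count_index = count_index+1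
--     for l in l_maj:
--         if l == letter:
--             is_maj = True
--     if count_index >= 26:
--         is_maj = True
--     if is_maj == True:
--         new_letter = letter
--     else:
--         new_letter = l_maj[count_index]
--     return new_letter
-- ===== SOURCE B (Python) =====
-- def to_maj(letter):
--     if isinstance(letter, str) and len(letter) == 1 and 'a' <= letter <= 'z':
--         return chr(ord(letter) - 32)
--     return letter
-- ===== Notes on version B (the rewrite author's own statement) =====
-- stated objective: idiomatic
-- what changed: Replaced the two 26-element table scans and parallel-list indexing with a closed-form guard (single char in 'a'..'z') and arithmetic case conversion chr(ord(c)-32).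
import Mathlib
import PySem

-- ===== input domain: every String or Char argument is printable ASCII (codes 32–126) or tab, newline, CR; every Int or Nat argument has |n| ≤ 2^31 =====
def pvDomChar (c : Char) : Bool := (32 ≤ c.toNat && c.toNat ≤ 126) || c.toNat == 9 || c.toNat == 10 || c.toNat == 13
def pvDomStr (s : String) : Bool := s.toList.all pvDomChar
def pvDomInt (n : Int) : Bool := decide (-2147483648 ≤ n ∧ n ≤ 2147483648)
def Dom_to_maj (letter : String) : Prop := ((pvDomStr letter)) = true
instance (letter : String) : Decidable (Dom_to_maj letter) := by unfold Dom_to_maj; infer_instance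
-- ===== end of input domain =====

-- B replaces A's two 26-element table scans with a closed-form single-lowercase-char guard
-- and arithmetic case conversion; objective: idiomatic (no speed claim).


-- ===== PORT A =====
def pvLMin : List String := ["a","b","c","d","e","f","g","h","i","j","k","l",
  "m","n","o","p","q","r","s","t","u","v","w","x","y","z"]
def pvLMaj : List String := ["A","B","C","D","E","F","G","H","I","J","K","L",
  "M","N","O","P","Q","R","S","T","U","V","W","X","Y","Z"]

-- the first for-loop with its break: counts elements before the first match
def pvCountIndex (l : List String) (letter : String) : Int :=
  match l with
  | [] => 0
  | x :: rest => if x == letter then 0 else pvCountIndex rest letter + 1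

def to_maj (letter : String) : String :=
  let l_min := pvLMin
  let l_maj := pvLMaj
  let count_index : Int := pvCountIndex l_min letter
  let is_maj : Bool := l_maj.foldl (fun b l => if l == letter then true else b) false
  let is_maj : Bool := if count_index ≥ 26 then true else is_maj
  if is_maj = true then letter
  else (PySem.List.pyGet? l_maj count_index).getD letter  -- index is always in range here

-- ===== PORT B =====
def to_maj_alt (letter : String) : String :=
  match letter.toList with
  | [c] => if 'a' ≤ c && c ≤ 'z' then String.ofList [Char.ofNat (c.toNat - 32)] else letter
  | _ => letter

-- ===== PRECONDITION & SPEC =====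
def Spec_to_maj (letter : String) (out : String) : Prop := out = to_maj_alt letter
instance (letter : String) (out : String) : Decidable (Spec_to_maj letter out) := by unfold Spec_to_maj; infer_instance

-- ===== CLAIM (what is proved, stated in full; the proofs are below) =====
def Claim_equal_to_maj : Prop := ∀ (letter : String), Dom_to_maj letter → Spec_to_maj letter (to_maj letter)

-- ===== LEMMAS AND PROOFS =====

def pvLowerChars : List Char := ['a','b','c','d','e','f','g','h','i','j','k','l',
  'm','n','o','p','q','r','s','t','u','v','w','x','y','z']

theorem pvRange_iff (c : Char) : ('a' ≤ c ∧ c ≤ 'z') ↔ c ∈ pvLowerChars := by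
  have h1 : ('a' ≤ c) ↔ 97 ≤ c.toNat := by
    constructor <;> intro h <;> simpa [Char.le_def, UInt32.le_iff_toNat_le] using h
  have h2 : (c ≤ 'z') ↔ c.toNat ≤ 122 := by
    constructor <;> intro h <;> simpa [Char.le_def, UInt32.le_iff_toNat_le] using h
  have hinj : ∀ d : Char, c.toNat = d.toNat → c = d := by
    intro d h
    exact Char.ext (UInt32.toNat_inj.mp h)
  constructor
  · rintro ⟨ha, hb⟩
    rw [h1] at ha; rw [h2] at hb
    have hmap : pvLowerChars.map Char.toNat = [97,98,99,100,101,102,103,104,105,106,107,108,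
        109,110,111,112,113,114,115,116,117,118,119,120,121,122] := by decide
    have hm : c.toNat ∈ pvLowerChars.map Char.toNat := by
      rw [hmap]
      simp only [List.mem_cons, List.not_mem_nil, or_false]
      omega
    obtain ⟨d, hd, hde⟩ := List.mem_map.mp hm
    have hcd : c = d := hinj d hde.symm
    rwa [hcd]
  · intro h
    fin_cases h <;> exact ⟨by decide, by decide⟩

theorem pvCountIndex_not_mem (l : List String) (letter : String) (h : letter ∉ l) :
    pvCountIndex l letter = (l.length : Int) := by
  induction l with
  | nil => simp [pvCountIndex]
  | cons x rest ih =>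
    have hx : (x == letter) = false := by
      simp only [List.mem_cons, not_or] at h
      simpa [beq_iff_eq] using fun he => h.1 he.symm
    simp [pvCountIndex, hx, ih (by simp only [List.mem_cons, not_or] at h; exact h.2)]

theorem pvMk_mem (c : Char) (h : c ∈ pvLowerChars) : String.ofList [c] ∈ pvLMin := by
  fin_cases h <;> decide

-- ===== VERDICT (by name: the statement is the Claim_ definition above) =====
theorem to_maj_spec : Claim_equal_to_maj := by
  intro letter _
  unfold Spec_to_maj
  by_cases hl : letter ∈ pvLMin
  · simp only [pvLMin, List.mem_cons, List.not_mem_nil, or_false] at hl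
    rcases hl with rfl|rfl|rfl|rfl|rfl|rfl|rfl|rfl|rfl|rfl|rfl|rfl|rfl|rfl|rfl|rfl|rfl|rfl|rfl|rfl|rfl|rfl|rfl|rfl|rfl|rfl <;> decide
  · have hc : pvCountIndex pvLMin letter = 26 := by
      simpa using pvCountIndex_not_mem pvLMin letter hl
    have hA : to_maj letter = letter := by
      simp [to_maj, hc]
    rw [hA]
    rcases hs : letter.toList with _ | ⟨c, _ | ⟨d, rest⟩⟩
    · simp [to_maj_alt, hs]
    · by_cases hr : 'a' ≤ c ∧ c ≤ 'z'
      · exfalso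
        apply hl
        have : letter = String.ofList [c] := by
          rw [← hs, String.ofList_toList]
        rw [this]
        exact pvMk_mem c ((pvRange_iff c).mp hr)
      · have : ('a' ≤ c && c ≤ 'z') = false := by
          rcases not_and_or.mp hr with h | h <;> simp [h]
        simp [to_maj_alt, hs, this]
    · simp [to_maj_alt, hs]
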